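-- pv_equiv track=rewrite | github.com/michaelsthr/advent-of-code | 2024/day07.py | validate_equation_mul_plus
-- ===== SOURCE A (Python) =====
-- def validate_equation_mul_plus(result, values, concat):
--     solutions = list()
--     solutions += [values[0]]
--     i = 1
--
--     while i < len(values):
--         next_value = values[i]
--         tmp_solutions = list()
--
--         for solution in solutions:
--             plus = solution + next_value
--             mul = solution * next_value
--             if concat:
--                 tmp_solutions += [int(str(solution) + str(next_value))]
--             tmp_solutions += [plus, mul]
--
--         solutions = tmp_solutions
--         i += 1
--
--     if result in solutions:
--         return True
--     return False
-- ===== SOURCE B (Python) =====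
-- def validate_equation_mul_plus(result, values, concat):
--     # Depth-first search over the operator choices with short-circuit on success:
--     # no candidate lists are materialised, and the search stops at the first hit.
--     def dfs(acc, i):
--         if i == len(values):
--             return acc == result
--         v = values[i]
--         return (dfs(acc + v, i + 1)
--                 or dfs(acc * v, i + 1)
--                 or (concat and dfs(int(str(acc) + str(v)), i + 1)))
--     return dfs(values[0], 1)
-- ===== Notes on version B (the rewrite author's own statement) =====
-- stated objective: alternative
-- what changed: Replaces A's breadth-first construction of the full list of all 3^n candidate values followed by a membership test with a recursive depth-first search over the operator choices that short-circuits at the first successful leaf and materialises no lists.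
import Mathlib
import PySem

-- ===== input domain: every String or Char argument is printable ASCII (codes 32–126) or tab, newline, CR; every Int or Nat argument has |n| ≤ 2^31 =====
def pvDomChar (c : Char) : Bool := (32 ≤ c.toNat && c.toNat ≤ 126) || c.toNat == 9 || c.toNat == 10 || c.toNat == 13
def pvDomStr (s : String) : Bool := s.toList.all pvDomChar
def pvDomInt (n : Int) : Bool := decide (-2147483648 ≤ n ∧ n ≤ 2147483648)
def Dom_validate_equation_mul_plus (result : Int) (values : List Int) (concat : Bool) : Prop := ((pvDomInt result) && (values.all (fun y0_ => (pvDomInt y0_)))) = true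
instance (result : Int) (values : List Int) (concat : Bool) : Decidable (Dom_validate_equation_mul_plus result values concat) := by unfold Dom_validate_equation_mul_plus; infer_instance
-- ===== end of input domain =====

-- B replaces A's breadth-first list of all candidate values by a short-circuiting
-- depth-first search over the operator choices (alternative decomposition, O(n) memory).

-- ===== PORT A =====
-- int(str(x) + str(y)); Python raises ValueError when y < 0 (str(y) starts with '-'),
-- exactly where ofChars? is none — those inputs are excluded by Pre_, the default 0 is never relied on.
def pyConcatInt (x y : Int) : Int :=
  (PySem.Int.ofChars? (PySem.Int.toChars x ++ PySem.Int.toChars y)).getD 0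

def validate_equation_mul_plus (result : Int) (values : List Int) (concat : Bool) : Bool :=
  match values with
  | [] => false  -- values[0] raises IndexError in Python; excluded by Pre_
  | v0 :: rest =>
    let solutions := rest.foldl (fun sols next_value =>
      sols.foldl (fun tmp solution =>
        tmp ++ (if concat then [pyConcatInt solution next_value] else [])
            ++ [solution + next_value, solution * next_value]) []) [v0]
    solutions.contains result

-- ===== PORT B =====
def dfsB (result : Int) (concat : Bool) : Int → List Int → Bool
  | acc, [] => acc == result
  | acc, v :: rest =>
    dfsB result concat (acc + v) rest ||
    dfsB result concat (acc * v) rest ||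
    (concat && dfsB result concat (pyConcatInt acc v) rest)

def validate_equation_mul_plus_alt (result : Int) (values : List Int) (concat : Bool) : Bool :=
  match values with
  | [] => false  -- values[0] raises IndexError in Source B; excluded by Pre_
  | v0 :: rest => dfsB result concat v0 rest

-- ===== PRECONDITION & SPEC =====
-- Pre_ excludes exactly the inputs on which the Python A raises: the empty list
-- (IndexError on values[0]) and, when concat is set, a negative value after the first
-- (int(str(solution) + str(next_value)) raises ValueError).
def Pre_validate_equation_mul_plus (result : Int) (values : List Int) (concat : Bool) : Prop :=
  values ≠ [] ∧ (concat = true → ∀ v ∈ values.tail, 0 ≤ v)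
instance (result : Int) (values : List Int) (concat : Bool) : Decidable (Pre_validate_equation_mul_plus result values concat) := by unfold Pre_validate_equation_mul_plus; infer_instance

def pvWitness_validate_equation_mul_plus : Int × List Int × Bool := (6, [2, 3], true)

def Spec_validate_equation_mul_plus (result : Int) (values : List Int) (concat : Bool) (out : Bool) : Prop := out = validate_equation_mul_plus_alt result values concat
instance (result : Int) (values : List Int) (concat : Bool) (out : Bool) : Decidable (Spec_validate_equation_mul_plus result values concat out) := by unfold Spec_validate_equation_mul_plus; infer_instance

-- ===== CLAIM (what is proved, stated in full; the proofs are below) =====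
def Claim_equal_validate_equation_mul_plus : Prop := ∀ (result : Int) (values : List Int) (concat : Bool), Dom_validate_equation_mul_plus result values concat → Pre_validate_equation_mul_plus result values concat → Spec_validate_equation_mul_plus result values concat (validate_equation_mul_plus result values concat)

-- ===== LEMMAS AND PROOFS =====

-- Invariant of A's level loop: membership of `result` in the final level list equals
-- "some current candidate leads to `result` in B's depth-first search".
theorem levels_contains_eq_any_dfs (result : Int) (concat : Bool) (rest : List Int) :
    ∀ sols : List Int,
      ((rest.foldl (fun sols next_value =>
        sols.foldl (fun tmp solution =>
          tmp ++ (if concat then [pyConcatInt solution next_value] else [])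
              ++ [solution + next_value, solution * next_value]) []) sols).contains result)
      = sols.any (fun s => dfsB result concat s rest) := by
  induction rest with
  | nil =>
      intro sols
      simp only [List.foldl_nil, dfsB]
      exact (List.any_beq' (l := sols) (a := result)).symm
  | cons v rest ih =>
      intro sols
      rw [List.foldl_cons, ih]
      simp only [List.append_assoc]
      rw [PySem.List.foldl_append_eq_flatMap
        (g := fun solution => (if concat then [pyConcatInt solution v] else [])
              ++ [solution + v, solution * v])]
      cases concat <;>
        simp [dfsB, List.any_flatMap, Bool.or_comm]

-- ===== VERDICT (by name: the statement is the Claim_ definition above) =====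
theorem validate_equation_mul_plus_spec : Claim_equal_validate_equation_mul_plus := by
  intro result values concat _hdom _hpre
  unfold Spec_validate_equation_mul_plus
  cases values with
  | nil => rfl
  | cons v0 rest =>
      show ((rest.foldl _ [v0]).contains result) = _
      rw [levels_contains_eq_any_dfs]
      simp [validate_equation_mul_plus_alt]
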